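-- pv_equiv track=rewrite | github.com/zsLin177/CopyNE | scripts/generate_char_vocab.py | generate_char_vocab
-- ===== SOURCE A (Python) =====
-- def generate_char_vocab(dict_lsts):
--     char_vocab = {}
--     char_vocab['<blank>'] = 0
--     char_vocab['<unk>'] = 1
--     for dict_lst in dict_lsts:
--         sent = dict_lst['txt']
--         for char in sent:
--             if char not in char_vocab:
--                 char_vocab[char] = len(char_vocab)
--     char_vocab['<sos/eos>'] = len(char_vocab)
--     return char_vocab
-- ===== SOURCE B (Python) =====
-- def generate_char_vocab(dict_lsts):
--     # concatenate all sentences, recover first-appearance order by sorting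
--     # the character set by each character's first index in the full text
--     s = ''.join(d['txt'] for d in dict_lsts)
--     vocab = {'<blank>': 0, '<unk>': 1}
--     for i, c in enumerate(sorted(set(s), key=s.find)):
--         vocab[c] = i + 2
--     vocab['<sos/eos>'] = len(vocab)
--     return vocab
-- ===== Notes on version B (the rewrite author's own statement) =====
-- stated objective: alternative
-- what changed: A grows one dict, interleaving a membership test with index assignment per character; B concatenates all sentences, takes the character set, recovers first-appearance order by sorting it with key=s.find, and then assigns indices in a separate enumerate pass.
import Mathlib
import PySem

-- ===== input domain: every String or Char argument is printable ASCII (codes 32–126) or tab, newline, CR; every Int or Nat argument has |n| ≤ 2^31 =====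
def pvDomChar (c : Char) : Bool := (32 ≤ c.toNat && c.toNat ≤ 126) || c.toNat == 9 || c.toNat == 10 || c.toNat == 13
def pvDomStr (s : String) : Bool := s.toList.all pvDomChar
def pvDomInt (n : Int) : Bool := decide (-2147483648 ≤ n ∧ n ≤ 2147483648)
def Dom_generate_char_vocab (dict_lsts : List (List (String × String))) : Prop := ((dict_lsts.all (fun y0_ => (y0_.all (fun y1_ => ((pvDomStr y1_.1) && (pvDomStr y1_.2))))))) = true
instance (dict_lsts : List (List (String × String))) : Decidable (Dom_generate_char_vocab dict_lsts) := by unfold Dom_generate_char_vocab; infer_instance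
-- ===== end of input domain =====

-- B replaces A's single interleaved membership-check-and-assign loop by: join all sentences,
-- take the character set, recover first-appearance order by sorting it with key = s.find,
-- then assign indices in a separate enumerate pass; objective: alternative (same cost class).

-- ===== PORT A =====
def generate_char_vocab (dict_lsts : List (List (String × String))) : List (String × Int) :=
  let cv : PySem.Dict String Int := ((PySem.Dict.empty).insert "<blank>" 0).insert "<unk>" 1
  let cv := dict_lsts.foldl (fun cv d =>
      let sent := PySem.Dict.getD ⟨d⟩ "txt" ""         -- dict_lst['txt']; Pre_ guarantees the key is present
      sent.toList.foldl (fun cv c =>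
        if cv.contains (String.ofList [c]) = false then
          cv.insert (String.ofList [c]) (cv.size : Int)
        else cv) cv) cv
  (cv.insert "<sos/eos>" (cv.size : Int)).items

-- ===== PORT B =====
def generate_char_vocab_alt (dict_lsts : List (List (String × String))) : List (String × Int) :=
  let s := PySem.Str.join "" (dict_lsts.map (fun d => PySem.Dict.getD ⟨d⟩ "txt" ""))  -- ''.join(d['txt'] …)
  let chars := PySem.List.sorted (PySem.Set.ofList s.toList)
                 (fun c => PySem.Str.find s (String.ofList [c]))                       -- sorted(set(s), key=s.find)
  let vocab : PySem.Dict String Int := ((PySem.Dict.empty).insert "<blank>" 0).insert "<unk>" 1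
  let vocab := (PySem.List.enumerate chars).foldl (fun v p => v.insert (String.ofList [p.2]) (p.1 + 2)) vocab
  (vocab.insert "<sos/eos>" (vocab.size : Int)).items

-- ===== PRECONDITION & SPEC =====
-- Pre_ excludes exactly the inputs where both Pythons raise KeyError: an inner dict without the key 'txt'.
def Pre_generate_char_vocab (dict_lsts : List (List (String × String))) : Prop :=
  ∀ d ∈ dict_lsts, (PySem.Dict.mk d).contains "txt" = true
instance (dict_lsts : List (List (String × String))) : Decidable (Pre_generate_char_vocab dict_lsts) := by unfold Pre_generate_char_vocab; infer_instance

def pvWitness_generate_char_vocab : (List (List (String × String))) := [[("txt", "aba")], [("txt", "cb")]]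

def Spec_generate_char_vocab (dict_lsts : List (List (String × String))) (out : List (String × Int)) : Prop := out = generate_char_vocab_alt dict_lsts
instance (dict_lsts : List (List (String × String))) (out : List (String × Int)) : Decidable (Spec_generate_char_vocab dict_lsts out) := by unfold Spec_generate_char_vocab; infer_instance

-- ===== CLAIM (what is proved, stated in full; the proofs are below) =====
def Claim_equal_generate_char_vocab : Prop := ∀ (dict_lsts : List (List (String × String))), Dom_generate_char_vocab dict_lsts → Pre_generate_char_vocab dict_lsts → Spec_generate_char_vocab dict_lsts (generate_char_vocab dict_lsts)

-- ===== LEMMAS AND PROOFS =====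

-- A's dict after the special tokens and the distinct characters `seen` have been inserted.
def pvMkDict (seen : List Char) : PySem.Dict String Int :=
  ⟨("<blank>", 0) :: ("<unk>", 1) :: seen.zipIdx.map (fun p => (String.ofList [p.1], (p.2 : Int) + 2))⟩

theorem pvSingleton_ne_blank (c : Char) : (("<blank>" : String) == String.ofList [c]) = false := by
  rw [beq_eq_false_iff_ne]
  intro h
  have := congrArg String.toList h
  simp at this

theorem pvSingleton_ne_unk (c : Char) : (("<unk>" : String) == String.ofList [c]) = false := by
  rw [beq_eq_false_iff_ne]
  intro h
  have := congrArg String.toList h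
  simp at this

theorem pvSingleton_beq (a c : Char) : ((String.ofList [a]) == String.ofList [c]) = (a == c) := by
  rcases Bool.eq_false_or_eq_true (a == c) with h | h <;> simp_all [String.ofList_inj]

theorem pvAny_zipIdx (seen : List Char) (c : Char) (k : Nat) :
    ((seen.zipIdx k).any fun p => String.ofList [p.1] == String.ofList [c]) = seen.contains c := by
  induction seen generalizing k with
  | nil => rfl
  | cons a t ih =>
      rw [List.zipIdx_cons, List.any_cons, pvSingleton_beq, ih, List.contains_cons, Bool.beq_comm]

theorem pvContains_pvMkDict (seen : List Char) (c : Char) :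
    (pvMkDict seen).contains (String.ofList [c]) = seen.contains c := by
  rw [pvMkDict, PySem.Dict.contains_mk]
  simp only [List.any_cons, pvSingleton_ne_blank, pvSingleton_ne_unk, List.any_map]
  rw [Bool.false_or, Bool.false_or]
  exact pvAny_zipIdx seen c 0

theorem pvSize_pvMkDict (seen : List Char) : (pvMkDict seen).size = seen.length + 2 := by
  simp [pvMkDict, PySem.Dict.size]

theorem pvMkDict_snoc (seen : List Char) (c : Char) (h : seen.contains c = false) :
    (pvMkDict seen).insert (String.ofList [c]) ((seen.length : Int) + 2) = pvMkDict (seen ++ [c]) := by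
  apply PySem.Dict.ext
  rw [PySem.Dict.items_insert_of_not_contains _ _ (by rw [pvContains_pvMkDict, h])]
  simp [pvMkDict, List.zipIdx_append]

theorem pvStep (seen : List Char) (c : Char) :
    (if (pvMkDict seen).contains (String.ofList [c]) = false then
        (pvMkDict seen).insert (String.ofList [c]) ((pvMkDict seen).size : Int)
      else pvMkDict seen) = pvMkDict (PySem.Set.add seen c) := by
  rw [pvContains_pvMkDict]
  by_cases hm : c ∈ seen
  · rw [if_neg (by simp [hm])]
    have hadd : PySem.Set.add seen c = seen := by
      simp [PySem.Set.add, PySem.Set.contains, hm]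
    rw [hadd]
  · have h' : seen.contains c = false := by simpa using hm
    rw [if_pos h', pvSize_pvMkDict]
    have hadd : PySem.Set.add seen c = seen ++ [c] := by
      simp [PySem.Set.add, PySem.Set.contains, hm]
    rw [hadd, ← pvMkDict_snoc seen c h']
    norm_num

theorem pvLoop (cs : List Char) (seen : List Char) :
    cs.foldl (fun cv c =>
        if cv.contains (String.ofList [c]) = false then
          cv.insert (String.ofList [c]) (cv.size : Int)
        else cv) (pvMkDict seen) = pvMkDict (PySem.Set.update seen cs) := by
  induction cs generalizing seen with
  | nil => rfl
  | cons c cs ih =>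
      simp only [List.foldl_cons, pvStep]
      exact ih _

-- ''.join with empty separator concatenates the pieces.
theorem pvJoin_nil_sep (parts : List (List Char)) : PySem.Chars.join [] parts = parts.flatten := by
  induction parts with
  | nil => rw [PySem.Chars.join_nil, List.flatten_nil]
  | cons p t ih =>
      cases t with
      | nil => simp [PySem.Chars.join_singleton]
      | cons q u => rw [PySem.Chars.join_cons_cons, ih]; simp

-- s.find(c) for a character c occurring in s is the index of c's first occurrence.
theorem pvFindGo_singleton (cs : List Char) (a : Char) (k : Nat) (h : a ∈ cs) :
    PySem.Chars.find.go [a] cs k = (k : Int) + cs.idxOf a := by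
  induction cs generalizing k with
  | nil => cases h
  | cons c t ih =>
      rw [PySem.Chars.find.go]
      by_cases hc : a = c
      · subst hc
        simp [List.isPrefixOf]
      · have hpre : List.isPrefixOf [a] (c :: t) = false := by
          simp only [List.isPrefixOf, Bool.and_eq_false_iff]
          exact Or.inl (beq_eq_false_iff_ne.mpr hc)
        rw [hpre]
        simp only [Bool.false_eq_true, if_false]
        have ht : a ∈ t := by
          rcases List.mem_cons.mp h with h' | h'
          · exact absurd h' hc
          · exact h'
        rw [ih (k + 1) ht, List.idxOf_cons_ne t (by simpa [eq_comm] using hc)]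
        push_cast
        ring

theorem pvFind_eq_idxOf (cs : List Char) (a : Char) (h : a ∈ cs) :
    PySem.Chars.find cs [a] = (cs.idxOf a : Int) := by
  rw [PySem.Chars.find, pvFindGo_singleton cs a 0 h]
  simp

-- The distinct characters, in first-appearance order, are pairwise increasing in first index.
theorem pvPairwise_idxOf (cs : List Char) :
    (PySem.Set.ofList cs).Pairwise (fun a b => cs.idxOf a < cs.idxOf b) := by
  induction cs with
  | nil => simp [PySem.Set.ofList_nil]
  | cons c t ih =>
      rw [PySem.Set.ofList_cons]
      refine List.Pairwise.cons ?_ ?_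
      · intro b hb
        have hbc : b ≠ c := ((PySem.Set.mem_discard _ _ _).mp hb).2
        rw [List.idxOf_cons_self, List.idxOf_cons_ne t (by simpa [eq_comm] using hbc)]
        omega
      · have hfilt : ((PySem.Set.ofList t).discard c).Pairwise (fun a b => t.idxOf a < t.idxOf b) :=
          List.Pairwise.filter _ ih
        refine hfilt.imp_of_mem ?_
        intro a b ha hb hlt
        have hac : a ≠ c := ((PySem.Set.mem_discard _ _ _).mp ha).2
        have hbc : b ≠ c := ((PySem.Set.mem_discard _ _ _).mp hb).2
        rw [List.idxOf_cons_ne t (by simpa [eq_comm] using hac),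
            List.idxOf_cons_ne t (by simpa [eq_comm] using hbc)]
        omega

-- Sorting the character set by first index reproduces first-appearance order.
theorem pvSorted_ofList (cs : List Char) :
    PySem.List.sorted (PySem.Set.ofList cs) (fun c => PySem.Chars.find cs [c]) =
      PySem.Set.ofList cs := by
  apply PySem.List.sorted_eq_of_perm_of_pairwise_lt _ _ _ (List.Perm.refl _)
  refine (pvPairwise_idxOf cs).imp_of_mem ?_
  intro a b ha hb hlt
  have ha' : a ∈ cs := (PySem.Set.mem_ofList cs a).mp ha
  have hb' : b ∈ cs := (PySem.Set.mem_ofList cs b).mp hb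
  rw [pvFind_eq_idxOf cs a ha', pvFind_eq_idxOf cs b hb']
  exact_mod_cast hlt

-- B's enumerate loop over fresh distinct characters builds the same dict A builds.
theorem pvLoopB (rest : List Char) (seen : List Char) (hnd : rest.Nodup)
    (hfresh : ∀ x ∈ rest, x ∉ seen) :
    (PySem.List.enumerate rest (seen.length : Int)).foldl
        (fun v p => v.insert (String.ofList [p.2]) (p.1 + 2)) (pvMkDict seen)
      = pvMkDict (seen ++ rest) := by
  induction rest generalizing seen with
  | nil => simp [PySem.List.enumerate]
  | cons c t ih =>
      rw [PySem.List.enumerate, List.foldl_cons]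
      have hc : seen.contains c = false := by
        simpa using hfresh c (List.mem_cons_self)
      rw [pvMkDict_snoc seen c hc]
      have hlen : (seen.length : Int) + 1 = ((seen ++ [c]).length : Int) := by simp
      rw [hlen, ih (seen ++ [c]) (List.Nodup.of_cons hnd) ?_]
      · simp
      · intro x hx
        have hxs : x ∉ seen := hfresh x (List.mem_cons_of_mem _ hx)
        have hxc : x ≠ c := by
          intro h; subst h
          exact (List.nodup_cons.mp hnd).1 hx
        simp [hxs, hxc]

theorem pvLoopB0 (rest : List Char) (hnd : rest.Nodup) :
    (PySem.List.enumerate rest).foldl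
        (fun v p => v.insert (String.ofList [p.2]) (p.1 + 2)) (pvMkDict [])
      = pvMkDict rest := by
  simpa using pvLoopB rest [] hnd (by simp)

-- ===== VERDICT (by name: the statement is the Claim_ definition above) =====
theorem generate_char_vocab_spec : Claim_equal_generate_char_vocab := by
  intro dict_lsts _ _
  unfold Spec_generate_char_vocab
  simp only [generate_char_vocab, generate_char_vocab_alt]
  -- the concatenation of all sentences, as a character list
  have hjoin : (PySem.Str.join "" (dict_lsts.map (fun d => PySem.Dict.getD ⟨d⟩ "txt" ""))).toList
      = dict_lsts.flatMap (fun d => (PySem.Dict.getD ⟨d⟩ "txt" "").toList) := by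
    rw [PySem.Str.toList_join]
    have : ("" : String).toList = [] := rfl
    rw [this, pvJoin_nil_sep, List.map_map, List.flatMap_def]
    rfl
  -- A's loop
  rw [← List.foldl_flatMap]
  have h0 : ((PySem.Dict.empty.insert "<blank>" 0).insert "<unk>" 1 : PySem.Dict String Int)
      = pvMkDict [] := by decide
  rw [h0, pvLoop]
  set cs := dict_lsts.flatMap (fun d => (PySem.Dict.getD ⟨d⟩ "txt" "").toList) with hcs
  have hupd : PySem.Set.update ([] : List Char) cs = PySem.Set.ofList cs := by
    rw [PySem.Set.ofList_eq_foldl]; rfl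
  rw [hupd]
  -- B's passes
  have hkey : (fun c => PySem.Str.find
        (PySem.Str.join "" (dict_lsts.map (fun d => PySem.Dict.getD ⟨d⟩ "txt" "")))
        (String.ofList [c]))
      = (fun c => PySem.Chars.find cs [c]) := by
    funext c
    rw [PySem.Str.find_eq, hjoin]
    simp
  rw [hjoin, hkey, pvSorted_ofList]
  rw [pvLoopB0 (PySem.Set.ofList cs) (PySem.Set.nodup_ofList cs)]
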